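-- pv_equiv track=rewrite | github.com/Zhenye-Na/leetcode | python/1288.remove-covered-intervals.py | removeCoveredIntervals_Solution2
-- ===== SOURCE A (Python) =====
-- from typing import List
--
-- def removeCoveredIntervals_Solution2(intervals: List[List[int]]) -> int:
--     if not intervals or len(intervals) == 0:
--         return 0
--
--     intervals.sort(key=lambda x: (x[0], -x[1]))
--     res = []
--     for interval in intervals:
--         if not res:
--             res.append(interval)
--         else:
--             if interval[0] >= res[-1][0] and interval[1] <= res[-1][1]:
--                 continue
--             else:
--                 res.append(interval)
--
--     return len(res)
-- ===== SOURCE B (Python) =====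
-- from typing import List
--
-- def removeCoveredIntervals_Solution2(intervals: List[List[int]]) -> int:
--     # Different algorithm: no sort, no scan state. The kept intervals are exactly
--     # the maximal distinct (start, end) pairs under containment, so count pairs
--     # not covered by any other distinct pair (O(m^2) pairwise check).
--     pairs = {(iv[0], iv[1]) for iv in intervals}
--     return sum(1 for p in pairs
--                if not any(q != p and q[0] <= p[0] and p[1] <= q[1] for q in pairs))
-- ===== Notes on version B (the rewrite author's own statement) =====
-- stated objective: alternative
-- what changed: Replaces sort-then-greedy-scan with a sort-free pairwise check: build the set of distinct (start,end) pairs and count those not contained in any other distinct pair (the maximal elements under containment).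
import Mathlib
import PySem

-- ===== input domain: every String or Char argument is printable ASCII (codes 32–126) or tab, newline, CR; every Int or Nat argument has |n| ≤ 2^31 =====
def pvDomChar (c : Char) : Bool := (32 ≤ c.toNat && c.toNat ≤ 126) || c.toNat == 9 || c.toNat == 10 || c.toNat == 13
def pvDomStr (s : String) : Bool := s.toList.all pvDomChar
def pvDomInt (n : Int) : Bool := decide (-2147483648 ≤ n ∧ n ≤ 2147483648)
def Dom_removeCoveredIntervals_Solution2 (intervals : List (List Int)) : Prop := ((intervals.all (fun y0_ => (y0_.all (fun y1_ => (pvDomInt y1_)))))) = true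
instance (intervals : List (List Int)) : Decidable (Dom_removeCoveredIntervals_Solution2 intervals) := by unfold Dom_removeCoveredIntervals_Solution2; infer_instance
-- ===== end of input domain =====

-- B drops A's sort-then-greedy-scan entirely: it counts the distinct (start, end) pairs that are
-- not contained in any other distinct pair (the maximal intervals under containment) — an
-- alternative sort-free pairwise algorithm. A sorts its argument in place; the equivalence proved
-- here is about the return value only.

-- ===== PORT A =====
def removeCoveredIntervals_Solution2 (intervals : List (List Int)) : Int :=
  if intervals = [] then 0
  else
    let sortedIvs := PySem.List.sorted2 intervals
      (fun x => PySem.List.pyGetD x 0 0) (fun x => -(PySem.List.pyGetD x 1 0))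
    let res := sortedIvs.foldl (fun res interval =>
      if res = [] then res ++ [interval]
      else
        let last := PySem.List.pyGetD res (-1) []
        if PySem.List.pyGetD interval 0 0 ≥ PySem.List.pyGetD last 0 0 ∧
           PySem.List.pyGetD interval 1 0 ≤ PySem.List.pyGetD last 1 0 then res
        else res ++ [interval]) []
    (res.length : Int)

-- ===== PORT B =====
-- the (iv[0], iv[1]) pair of an interval
def pvPair (iv : List Int) : Int × Int :=
  (PySem.List.pyGetD iv 0 0, PySem.List.pyGetD iv 1 0)

def removeCoveredIntervals_Solution2_alt (intervals : List (List Int)) : Int :=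
  let pairs : PySem.Set (Int × Int) := PySem.Set.ofList (intervals.map pvPair)
  ((pairs.filter (fun p =>
      ! pairs.any (fun q => q != p && decide (q.1 ≤ p.1) && decide (p.2 ≤ q.2)))).length : Int)

-- ===== PRECONDITION & SPEC =====
-- Pre_ excludes intervals containing a sublist of length < 2, on which the Python A (its sort key
-- x[1]) raises IndexError (B raises there too, in its set comprehension).
def Pre_removeCoveredIntervals_Solution2 (intervals : List (List Int)) : Prop :=
  ∀ l ∈ intervals, 2 ≤ l.length
instance (intervals : List (List Int)) : Decidable (Pre_removeCoveredIntervals_Solution2 intervals) := by unfold Pre_removeCoveredIntervals_Solution2; infer_instance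

def pvWitness_removeCoveredIntervals_Solution2 : List (List Int) := [[1, 4], [2, 3], [0, 1]]

def Spec_removeCoveredIntervals_Solution2 (intervals : List (List Int)) (out : Int) : Prop := out = removeCoveredIntervals_Solution2_alt intervals
instance (intervals : List (List Int)) (out : Int) : Decidable (Spec_removeCoveredIntervals_Solution2 intervals out) := by unfold Spec_removeCoveredIntervals_Solution2; infer_instance

-- ===== CLAIM (what is proved, stated in full; the proofs are below) =====
def Claim_equal_removeCoveredIntervals_Solution2 : Prop := ∀ (intervals : List (List Int)), Dom_removeCoveredIntervals_Solution2 intervals → Pre_removeCoveredIntervals_Solution2 intervals → Spec_removeCoveredIntervals_Solution2 intervals (removeCoveredIntervals_Solution2 intervals)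

-- ===== LEMMAS AND PROOFS =====

-- A's loop body, named for the proofs (defeq to the lambda inside the port of A).
def pvStepA (res : List (List Int)) (interval : List Int) : List (List Int) :=
  if res = [] then res ++ [interval]
  else
    let last := PySem.List.pyGetD res (-1) []
    if PySem.List.pyGetD interval 0 0 ≥ PySem.List.pyGetD last 0 0 ∧
       PySem.List.pyGetD interval 1 0 ≤ PySem.List.pyGetD last 1 0 then res
    else res ++ [interval]

-- running-max greedy count over the sorted pair list (proof-side abstraction of A's loop)
def pvCnt : List (Int × Int) → Option Int → Int
  | [], _ => 0
  | p :: t, none => 1 + pvCnt t (some p.2)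
  | p :: t, some m => if p.2 > m then 1 + pvCnt t (some p.2) else pvCnt t (some m)

-- ≤ in the sort order (key (start, -end)), as a relation on pairs
def pvRel (a b : Int × Int) : Prop := a.1 < b.1 ∨ (a.1 = b.1 ∧ b.2 ≤ a.2)

-- p is maximal under containment among the pairs of w (Bool, as in B's port)
def pvMaxB (w : List (Int × Int)) (p : Int × Int) : Bool :=
  ! w.any (fun q => q != p && decide (q.1 ≤ p.1) && decide (p.2 ≤ q.2))

-- sorted2 with Int keys IS sorted under the lexicographic product key.
lemma pvSorted2_eq_sorted_lex (xs : List (List Int)) (k1 k2 : List Int → Int) :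
    PySem.List.sorted2 xs k1 k2 false
      = PySem.List.sorted xs (fun a => toLex (k1 a, k2 a)) false := by
  rw [PySem.List.sorted_eq_foldl_insertBy]
  show List.foldl (fun acc x => PySem.List.insertBy
      (fun a b => decide (k1 a < k1 b) || (!decide (k1 b < k1 a) && decide (k2 a < k2 b))) x acc) [] xs = _
  have hbe : (fun (a b : List Int) =>
        decide (k1 a < k1 b) || (!decide (k1 b < k1 a) && decide (k2 a < k2 b)))
      = (fun (a b : List Int) => decide (toLex (k1 a, k2 a) < toLex (k1 b, k2 b))) := by
    funext a b
    rw [Bool.eq_iff_iff]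
    simp only [Bool.or_eq_true, Bool.and_eq_true, Bool.not_eq_true', decide_eq_true_eq,
      decide_eq_false_iff_not, Prod.Lex.lt_iff, ofLex_toLex]
    omega
  rw [hbe]

-- the pair list of the sorted interval list is pairwise pvRel
lemma pvSorted_pairwise (xs : List (List Int)) :
    ((PySem.List.sorted2 xs (fun x => PySem.List.pyGetD x 0 0)
        (fun x => -(PySem.List.pyGetD x 1 0)) false).map pvPair).Pairwise pvRel := by
  rw [pvSorted2_eq_sorted_lex]
  refine List.Pairwise.map pvPair ?_ ((PySem.List.sorted_pairwise xs _))
  intro a b h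
  rw [Prod.Lex.le_iff] at h
  simp only [ofLex_toLex] at h
  unfold pvRel pvPair
  rcases h with h' | ⟨h1, h2⟩
  · exact Or.inl h'
  · exact Or.inr ⟨h1, by omega⟩

-- A's fold = running-max greedy count (invariant: mend mirrors the end of the last kept interval,
-- whose start is ≤ every remaining start)
lemma pvLoop_agree : ∀ (s res : List (List Int)) (mend : Option Int),
    s.Pairwise (fun a b => PySem.List.pyGetD a 0 0 ≤ PySem.List.pyGetD b 0 0) →
    (match res.getLast? with
     | none => mend = none
     | some last => mend = some (PySem.List.pyGetD last 1 0) ∧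
         ∀ x ∈ s, PySem.List.pyGetD last 0 0 ≤ PySem.List.pyGetD x 0 0) →
    ((s.foldl pvStepA res).length : Int) = (res.length : Int) + pvCnt (s.map pvPair) mend := by
  intro s
  induction s with
  | nil => intro res mend _ _; simp [pvCnt]
  | cons x s' ih =>
    intro res mend hpw hinv
    have hpw' := (List.pairwise_cons.mp hpw).2
    have hx := (List.pairwise_cons.mp hpw).1
    match hres : res with
    | [] =>
      have hm : mend = none := by simpa using hinv
      simp only [List.foldl_cons, List.map_cons, hm]
      have hA : pvStepA [] x = [x] := by simp [pvStepA]
      rw [hA]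
      show ((s'.foldl pvStepA [x]).length : Int) = 0 + pvCnt (pvPair x :: s'.map pvPair) none
      have : pvCnt (pvPair x :: s'.map pvPair) none = 1 + pvCnt (s'.map pvPair) (some (PySem.List.pyGetD x 1 0)) := by
        simp [pvCnt, pvPair]
      rw [this]
      have := ih [x] (some (PySem.List.pyGetD x 1 0)) hpw' (by
        show (match ([x] : List (List Int)).getLast? with
          | none => (some (PySem.List.pyGetD x 1 0) : Option Int) = none
          | some last => some (PySem.List.pyGetD x 1 0) = some (PySem.List.pyGetD last 1 0) ∧
              ∀ y ∈ s', PySem.List.pyGetD last 0 0 ≤ PySem.List.pyGetD y 0 0)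
        rw [List.getLast?_singleton]
        exact ⟨rfl, fun y hy => hx y hy⟩)
      rw [this]
      simp only [List.length_cons, List.length_nil]
      push_cast
      omega
    | r :: rs =>
      have hne : r :: rs ≠ [] := by simp
      obtain ⟨last, hlast⟩ : ∃ last, (r :: rs).getLast? = some last :=
        ⟨(r :: rs).getLast hne, List.getLast?_eq_some_getLast hne⟩
      rw [hlast] at hinv
      obtain ⟨hm, hle⟩ := hinv
      have hlastget : PySem.List.pyGetD (r :: rs) (-1) [] = last := by
        simp [PySem.List.pyGetD, PySem.List.pyGet?_neg_one, hlast]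
      have hxge : PySem.List.pyGetD x 0 0 ≥ PySem.List.pyGetD last 0 0 :=
        hle x (by simp)
      simp only [List.foldl_cons, List.map_cons, hm]
      by_cases hc : PySem.List.pyGetD x 1 0 ≤ PySem.List.pyGetD last 1 0
      · -- covered: skipped, not counted
        have hA : pvStepA (r :: rs) x = r :: rs := by
          simp [pvStepA, hlastget, hxge, hc]
        have hB : pvCnt (pvPair x :: s'.map pvPair) (some (PySem.List.pyGetD last 1 0))
            = pvCnt (s'.map pvPair) (some (PySem.List.pyGetD last 1 0)) := by
          simp [pvCnt, pvPair, if_neg (not_lt.mpr hc)]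
        rw [hA, hB]
        exact ih (r :: rs) (some (PySem.List.pyGetD last 1 0)) hpw' (by
          rw [hlast]; exact ⟨rfl, fun y hy => hle y (by simp [hy])⟩)
      · -- not covered: appended and counted
        have hA : pvStepA (r :: rs) x = (r :: rs) ++ [x] := by
          simp only [pvStepA, hlastget, if_neg hne]
          rw [if_neg]; intro h; exact hc h.2
        have hB : pvCnt (pvPair x :: s'.map pvPair) (some (PySem.List.pyGetD last 1 0))
            = 1 + pvCnt (s'.map pvPair) (some (PySem.List.pyGetD x 1 0)) := by
          simp [pvCnt, pvPair, if_pos (not_le.mp hc)]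
        rw [hA, hB]
        have := ih ((r :: rs) ++ [x]) (some (PySem.List.pyGetD x 1 0)) hpw' (by
          have hgl : ((r :: rs) ++ [x]).getLast? = some x := List.getLast?_concat
          show (match ((r :: rs) ++ [x]).getLast? with
            | none => (some (PySem.List.pyGetD x 1 0) : Option Int) = none
            | some last => some (PySem.List.pyGetD x 1 0) = some (PySem.List.pyGetD last 1 0) ∧
                ∀ y ∈ s', PySem.List.pyGetD last 0 0 ≤ PySem.List.pyGetD y 0 0)
          rw [hgl]
          exact ⟨rfl, fun y hy => hx y hy⟩)
        rw [this]
        simp only [List.length_append, List.length_cons, List.length_nil]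
        push_cast
        omega

lemma pvMaxB_eq_true_iff (w : List (Int × Int)) (p : Int × Int) :
    pvMaxB w p = true ↔ ¬ ∃ q ∈ w, q ≠ p ∧ q.1 ≤ p.1 ∧ p.2 ≤ q.2 := by
  simp [pvMaxB, and_assoc]

-- the loop predicate, in Prop form
lemma pvPred_iff (w : List (Int × Int)) (l : List (Int × Int)) (q : Int × Int) :
    ((!l.contains q && pvMaxB w q) = true) ↔ (q ∉ l ∧ pvMaxB w q = true) := by
  simp

-- Finset step, kept element: the predicate holds at p, so the count gains one and p moves to pre.
lemma pvFilter_step_keep (w pre : List (Int × Int)) (p : Int × Int) (t' : List (Int × Int))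
    (hPp : (!pre.contains p && pvMaxB w p) = true) :
    ((p :: t').toFinset.filter (fun q => (!pre.contains q && pvMaxB w q) = true)).card
      = ((t'.toFinset.filter (fun q => (!(pre ++ [p]).contains q && pvMaxB w q) = true)).card) + 1 := by
  rw [pvPred_iff] at hPp
  rw [List.toFinset_cons]
  have hset : (insert p t'.toFinset).filter (fun q => (!pre.contains q && pvMaxB w q) = true)
      = insert p (t'.toFinset.filter (fun q => (!(pre ++ [p]).contains q && pvMaxB w q) = true)) := by
    ext q
    simp only [Finset.mem_filter, Finset.mem_insert, List.mem_toFinset, pvPred_iff,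
      List.mem_append, List.mem_singleton]
    by_cases hqp : q = p
    · subst hqp; tauto
    · tauto
  rw [hset, Finset.card_insert_of_notMem]
  simp only [Finset.mem_filter, pvPred_iff, List.mem_append, List.mem_singleton]
  tauto

-- Finset step, skipped element: the predicate fails at p, so the count is unchanged.
lemma pvFilter_step_drop (w pre : List (Int × Int)) (p : Int × Int) (t' : List (Int × Int))
    (hPp : (!pre.contains p && pvMaxB w p) = false) :
    ((p :: t').toFinset.filter (fun q => (!pre.contains q && pvMaxB w q) = true)).card
      = (t'.toFinset.filter (fun q => (!(pre ++ [p]).contains q && pvMaxB w q) = true)).card := by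
  have hP : ¬ (p ∉ pre ∧ pvMaxB w p = true) := by
    intro h
    have h2 := (pvPred_iff w pre p).mpr h
    rw [hPp] at h2
    simp at h2
  rw [List.toFinset_cons]
  congr 1
  ext q
  simp only [Finset.mem_filter, Finset.mem_insert, List.mem_toFinset, pvPred_iff,
    List.mem_append, List.mem_singleton]
  by_cases hqp : q = p
  · subst hqp; tauto
  · tauto

-- MAIN COUNTING LEMMA: on a pairwise-sorted pair list, the running-max greedy count equals the
-- number of pairs that are maximal under containment and not seen in the processed prefix.
lemma pvCnt_eq_card (w : List (Int × Int)) (hw : w.Pairwise pvRel) :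
    ∀ (t pre : List (Int × Int)) (m : Option Int), pre ++ t = w →
    (match m with
     | none => pre = []
     | some M => (∀ q ∈ pre, q.2 ≤ M) ∧ ∃ q ∈ pre, q.2 = M) →
    pvCnt t m = ((t.toFinset.filter (fun p => (!pre.contains p && pvMaxB w p) = true)).card : Int) := by
  intro t
  induction t with
  | nil => intro pre m _ _; simp [pvCnt]
  | cons p t' ih =>
    intro pre m hsplit hm
    have hw' : (pre ++ p :: t').Pairwise pvRel := hsplit ▸ hw
    have hPA := List.pairwise_append.mp hw'
    have hpre_p : ∀ q ∈ pre, pvRel q p := fun q hq => hPA.2.2 q hq p (by simp)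
    have ht' : ∀ q ∈ t', pvRel p q := (List.pairwise_cons.mp hPA.2.1).1
    have hqmem : ∀ q : Int × Int, q ∈ w ↔ q ∈ pre ∨ q = p ∨ q ∈ t' := by
      intro q; rw [← hsplit]; simp
    -- maximality of p given that every already-seen end is strictly below p.2
    have hmax_of : (∀ q ∈ pre, q.2 < p.2) → pvMaxB w p = true := by
      intro hlt
      rw [pvMaxB_eq_true_iff]
      rintro ⟨q, hq, hne, hle1, hle2⟩
      rcases (hqmem q).1 hq with hq | hq | hq
      · exact absurd hle2 (not_le.mpr (hlt q hq))
      · exact hne hq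
      · rcases ht' q hq with h | ⟨h1, h2⟩
        · omega
        · exact hne (Prod.ext h1.symm (by omega))
    match m with
    | none =>
      have hpre : pre = [] := hm
      subst hpre
      have hmax : pvMaxB w p = true := hmax_of (by simp)
      have hcnt : pvCnt (p :: t') none = 1 + pvCnt t' (some p.2) := rfl
      rw [hcnt, ih [p] (some p.2) (by simpa using hsplit)
        ⟨by simp, p, by simp⟩]
      rw [pvFilter_step_keep w [] p t' (by simp [hmax])]
      simp only [List.nil_append]
      push_cast
      exact add_comm 1 _
    | some M =>
      obtain ⟨hub, q0, hq0mem, hq0⟩ := hm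
      by_cases hgt : p.2 > M
      · -- counted
        have hmax : pvMaxB w p = true := hmax_of (fun q hq => lt_of_le_of_lt (hub q hq) hgt)
        have hnp : p ∉ pre := by
          intro hc
          have := hub p hc
          omega
        have hcnt : pvCnt (p :: t') (some M) = 1 + pvCnt t' (some p.2) := by
          simp [pvCnt, hgt]
        rw [hcnt, ih (pre ++ [p]) (some p.2) (by simpa using hsplit)
          ⟨by
            intro q hq
            rcases List.mem_append.mp hq with hq | hq
            · exact le_of_lt (lt_of_le_of_lt (hub q hq) hgt)
            · simp at hq; exact hq ▸ le_refl _,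
           p, by simp⟩]
        rw [pvFilter_step_keep w pre p t' (by simp [hmax, hnp])]
        push_cast
        exact add_comm 1 _
      · -- skipped
        have hle : p.2 ≤ M := by omega
        have hcnt : pvCnt (p :: t') (some M) = pvCnt t' (some M) := by
          simp [pvCnt, hgt]
        have hPp : (!pre.contains p && pvMaxB w p) = false := by
          by_cases hmem : p ∈ pre
          · have hcont : pre.contains p = true := List.contains_iff_mem.mpr hmem
            rw [hcont]
            rfl
          · have : pvMaxB w p = false := by
              rw [Bool.eq_false_iff, Ne, pvMaxB_eq_true_iff, not_not]
              refine ⟨q0, (hqmem q0).2 (Or.inl hq0mem), fun h => hmem (h ▸ hq0mem), ?_, by omega⟩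
              rcases hpre_p q0 hq0mem with h | ⟨h1, _⟩
              · omega
              · omega
            simp [this]
        rw [hcnt, ih (pre ++ [p]) (some M) (by simpa using hsplit)
          ⟨by
            intro q hq
            rcases List.mem_append.mp hq with hq | hq
            · exact hub q hq
            · simp at hq; subst hq; omega,
           q0, List.mem_append.mpr (Or.inl hq0mem), hq0⟩]
        rw [pvFilter_step_drop w pre p t' hPp]

-- ===== VERDICT (by name: the statement is the Claim_ definition above) =====
theorem removeCoveredIntervals_Solution2_spec : Claim_equal_removeCoveredIntervals_Solution2 := by
  intro intervals _ _
  unfold Spec_removeCoveredIntervals_Solution2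
  unfold removeCoveredIntervals_Solution2 removeCoveredIntervals_Solution2_alt
  by_cases hnil : intervals = []
  · subst hnil; rfl
  · simp only [if_neg hnil]
    set s := PySem.List.sorted2 intervals
      (fun x => PySem.List.pyGetD x 0 0) (fun x => -(PySem.List.pyGetD x 1 0)) with hs
    set w := s.map pvPair with hwdef
    set P := PySem.Set.ofList (intervals.map pvPair) with hP
    -- membership transfers: P, w and intervals.map pvPair have the same elements
    have hmemw : ∀ q : Int × Int, q ∈ w ↔ q ∈ intervals.map pvPair := by
      intro q
      rw [hwdef, List.mem_map, List.mem_map]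
      constructor <;> rintro ⟨x, hx, rfl⟩
      · exact ⟨x, (PySem.List.sorted2_perm intervals _ _ false).mem_iff.mp hx, rfl⟩
      · exact ⟨x, (PySem.List.sorted2_perm intervals _ _ false).mem_iff.mpr hx, rfl⟩
    have hmemP : ∀ q : Int × Int, q ∈ P ↔ q ∈ intervals.map pvPair := fun q =>
      PySem.Set.mem_ofList _ q
    -- Step 1: A's fold = running-max greedy count over w
    have hA : ((s.foldl pvStepA []).length : Int) = pvCnt w none := by
      have hpw : s.Pairwise (fun a b => PySem.List.pyGetD a 0 0 ≤ PySem.List.pyGetD b 0 0) := by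
        have := pvSorted_pairwise intervals
        rw [← hs, hwdef] at *
        rw [List.pairwise_map] at this
        exact this.imp (by intro a b h; rcases h with h | ⟨h, _⟩ <;> simp [pvPair] at h ⊢ <;> omega)
      simpa using pvLoop_agree s [] none hpw (by simp)
    -- Step 2: greedy count = number of maximal pairs of w
    have hC : pvCnt w none
        = ((w.toFinset.filter (fun p => pvMaxB w p = true)).card : Int) := by
      rw [pvCnt_eq_card w (pvSorted_pairwise intervals) w [] none rfl rfl]
      norm_num
    -- Step 3: B counts the same maximal pairs
    have hB : ((P.filter (fun p =>
          ! P.any (fun q => q != p && decide (q.1 ≤ p.1) && decide (p.2 ≤ q.2)))).length : Int)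
        = ((w.toFinset.filter (fun p => pvMaxB w p = true)).card : Int) := by
      have hpred : ∀ p : Int × Int,
          (! P.any (fun q => q != p && decide (q.1 ≤ p.1) && decide (p.2 ≤ q.2))) = pvMaxB w p := by
        intro p
        unfold pvMaxB
        rw [Bool.eq_iff_iff]
        simp only [Bool.not_eq_true', List.any_eq_false]
        constructor <;> intro h q hq
        · exact h q ((hmemP q).mpr ((hmemw q).mp hq))
        · exact h q ((hmemw q).mpr ((hmemP q).mp hq))
      rw [List.filter_congr (fun p _ => hpred p)]
      have hnodup : (P.filter (fun p => pvMaxB w p)).Nodup :=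
        (PySem.Set.nodup_ofList _).filter _
      rw [← List.toFinset_card_of_nodup hnodup, List.toFinset_filter]
      have hfin : P.toFinset = w.toFinset := by
        ext q
        simp only [List.mem_toFinset]
        rw [hmemP, hmemw]
      rw [hfin]
    exact hA.trans (hC.trans hB.symm)
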